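-- pv_equiv track=rewrite | github.com/ytliu0/ChineseCalendar-python | src/ChineseCalendar_py/names.py | chinese_year_num_names
-- ===== SOURCE A (Python) =====
-- def chinese_year_num_names(lang):
--   if lang=='Eng':
--     num = [' '+str(i) for i in range(1,70)]
--   else:
--     cnum = ['一', '二', '三', '四', '五', '六', '七', '八', '九', '十']
--     num = ['元'] + [cnum[i] for i in range(1,10)] + ['十'+cnum[i] for i in range(9)] + ['二十']
--     for k in range(1, 6):
--       num += [cnum[k]+'十'+cnum[i] for i in range(9)]
--       if k < 5:
--         num += [cnum[k+1]+'十']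
--   return num
-- ===== SOURCE B (Python) =====
-- def chinese_year_num_names(lang):
--   if lang == 'Eng':
--     return [' ' + str(i) for i in range(1, 70)]
--   cnum = ['一', '二', '三', '四', '五', '六', '七', '八', '九', '十']
--   def name(n):
--     if n == 1:
--       return '元'
--     if n <= 10:
--       return cnum[n - 1]
--     if n < 20:
--       return '十' + cnum[n - 11]
--     if n % 10 == 0:
--       return cnum[n // 10 - 1] + '十'
--     return cnum[n // 10 - 1] + '十' + cnum[n % 10 - 1]
--   return [name(n) for n in range(1, 70)]
-- ===== Notes on version B (the rewrite author's own statement) =====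
-- stated objective: simpler
-- what changed: Replaces A's block-by-block concatenation of five hand-written list segments plus an accumulating loop with a single uniform map over 1..69 using one numeral-naming helper.
import Mathlib
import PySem

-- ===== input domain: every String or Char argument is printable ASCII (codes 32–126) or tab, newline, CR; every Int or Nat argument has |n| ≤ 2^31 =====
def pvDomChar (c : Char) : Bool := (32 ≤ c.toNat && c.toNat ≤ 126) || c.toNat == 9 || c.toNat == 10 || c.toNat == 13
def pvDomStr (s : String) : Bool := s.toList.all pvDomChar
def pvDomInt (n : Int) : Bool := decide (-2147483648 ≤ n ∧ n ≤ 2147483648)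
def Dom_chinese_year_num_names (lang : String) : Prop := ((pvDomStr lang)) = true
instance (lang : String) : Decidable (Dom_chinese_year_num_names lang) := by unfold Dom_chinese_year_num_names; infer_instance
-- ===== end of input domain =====

-- B replaces A's block-by-block list construction with one uniform map over 1..69
-- using a numeral-naming helper (simpler decomposition; return value equivalence only).

-- ===== PORT A =====
def chinese_year_num_names (lang : String) : List String :=
  if lang == "Eng" then
    (PySem.List.pyRange 1 70 1).map (fun i => " " ++ PySem.Int.toStr i)
  else
    let cnum : List String := ["一", "二", "三", "四", "五", "六", "七", "八", "九", "十"]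
    let num : List String :=
      ["元"] ++ (PySem.List.pyRange 1 10 1).map (fun i => PySem.List.pyGetD cnum i "")
        ++ (PySem.List.pyRange 0 9 1).map (fun i => "十" ++ PySem.List.pyGetD cnum i "")
        ++ ["二十"]
    (PySem.List.pyRange 1 6 1).foldl (fun num k =>
      let num := num ++ (PySem.List.pyRange 0 9 1).map
        (fun i => PySem.List.pyGetD cnum k "" ++ "十" ++ PySem.List.pyGetD cnum i "")
      if k < 5 then num ++ [PySem.List.pyGetD cnum (k + 1) "" ++ "十"] else num) num

-- ===== PORT B =====
def pvCnName (cnum : List String) (n : Int) : String :=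
  if n == 1 then "元"
  else if n ≤ 10 then PySem.List.pyGetD cnum (n - 1) ""
  else if n < 20 then "十" ++ PySem.List.pyGetD cnum (n - 11) ""
  else if PySem.Int.mod n 10 == 0 then PySem.List.pyGetD cnum (PySem.Int.floordiv n 10 - 1) "" ++ "十"
  else PySem.List.pyGetD cnum (PySem.Int.floordiv n 10 - 1) "" ++ "十"
        ++ PySem.List.pyGetD cnum (PySem.Int.mod n 10 - 1) ""

def chinese_year_num_names_alt (lang : String) : List String :=
  if lang == "Eng" then
    (PySem.List.pyRange 1 70 1).map (fun i => " " ++ PySem.Int.toStr i)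
  else
    let cnum : List String := ["一", "二", "三", "四", "五", "六", "七", "八", "九", "十"]
    (PySem.List.pyRange 1 70 1).map (pvCnName cnum)

-- ===== PRECONDITION & SPEC =====
def Spec_chinese_year_num_names (lang : String) (out : List String) : Prop := out = chinese_year_num_names_alt lang
instance (lang : String) (out : List String) : Decidable (Spec_chinese_year_num_names lang out) := by unfold Spec_chinese_year_num_names; infer_instance

-- ===== CLAIM (what is proved, stated in full; the proofs are below) =====
def Claim_equal_chinese_year_num_names : Prop := ∀ (lang : String), Dom_chinese_year_num_names lang → Spec_chinese_year_num_names lang (chinese_year_num_names lang)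

-- ===== LEMMAS AND PROOFS =====

-- ===== VERDICT (by name: the statement is the Claim_ definition above) =====
theorem chinese_year_num_names_spec : Claim_equal_chinese_year_num_names := by
  intro lang _
  unfold Spec_chinese_year_num_names chinese_year_num_names chinese_year_num_names_alt
  by_cases h : lang == "Eng"
  · simp [h]
  · simp only [h]
    decide
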